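-- pv_equiv track=rewrite | github.com/social-link-analytics-group-bsc/gender_bioinfo | data_wrangler.py | __generate_alternative_names
-- ===== SOURCE A (Python) =====
-- def __generate_alternative_names(name):
--     name_vec = name.split()
--     alternative_names = []
--     alternative_name = ''
--     for i in range(1, len(name_vec)):
--         for j in range(0, len(name_vec)):
--             if i == j:
--                 alternative_name = alternative_name[:len(alternative_name) - 1]
--                 alternative_name += '-'
--             alternative_name += name_vec[j]
--             if j < len(name_vec) - 1:
--                 alternative_name += ' '
--         alternative_names.append(alternative_name)
--         alternative_name = ''
--     return alternative_names
-- ===== SOURCE B (Python) =====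
-- def __generate_alternative_names(name):
--     words = name.split()
--     return [' '.join(words[:i]) + '-' + ' '.join(words[i:])
--             for i in range(1, len(words))]
-- ===== Notes on version B (the rewrite author's own statement) =====
-- stated objective: simpler
-- what changed: Replaces A's nested char-by-char accumulation (with its drop-last-space-then-hyphen hack) by a comprehension over split positions using slicing and two space-joins.
import Mathlib
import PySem

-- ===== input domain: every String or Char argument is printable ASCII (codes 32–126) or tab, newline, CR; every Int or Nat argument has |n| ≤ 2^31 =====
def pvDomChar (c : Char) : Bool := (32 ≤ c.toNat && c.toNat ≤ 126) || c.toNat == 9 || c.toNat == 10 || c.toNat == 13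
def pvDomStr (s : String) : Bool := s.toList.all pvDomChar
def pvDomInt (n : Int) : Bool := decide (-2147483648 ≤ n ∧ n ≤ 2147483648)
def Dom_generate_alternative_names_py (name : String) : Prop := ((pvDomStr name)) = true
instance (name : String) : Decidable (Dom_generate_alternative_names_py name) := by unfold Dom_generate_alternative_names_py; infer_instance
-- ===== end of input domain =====

-- B replaces A's nested char-by-char accumulation (and its drop-last-space-then-hyphen hack)
-- with slicing plus two joins per split position; objective: simpler.

-- ===== PORT A =====
-- the inner-loop body of A; the growing string is kept as List Char (PySem.Chars is the
-- exact model of Python str; Lean's String.append is kernel-opaque)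
def pvAInnerStep (name_vec : List String) (i : Int) (s : List Char) (j : Int) : List Char :=
  -- the i == j branch: drop the last char of the accumulator, then append a hyphen
  let s := if i == j then (PySem.List.slice s none (some ((s.length : Int) - 1))) ++ ['-'] else s
  -- append name_vec[j] (j always in range here; pyGetD is exact for 0 ≤ j < len)
  let s := s ++ (PySem.List.pyGetD name_vec j "").toList
  -- the trailing-space branch of A's inner loop (space added after every word but the last)
  if j < (name_vec.length : Int) - 1 then s ++ [' '] else s

def generate_alternative_names_py (name : String) : List String :=
  let name_vec := PySem.Str.split₀ name
  -- state: (alternative_names, alternative_name); alternative_name is reset to '' each round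
  let res := (PySem.List.pyRange 1 (name_vec.length : Int) 1).foldl
    (fun (st : List String × List Char) i =>
      let s := (PySem.List.pyRange 0 (name_vec.length : Int) 1).foldl (pvAInnerStep name_vec i) st.2
      (st.1 ++ [String.mk s], ([] : List Char)))
    ([], [])
  res.1

-- ===== PORT B =====
-- ' '.join(xs) is PySem.Chars.join [' '] on the char lists (exact; Str.join is this wrapper)
def generate_alternative_names_py_alt (name : String) : List String :=
  let words := PySem.Str.split₀ name
  (PySem.List.pyRange 1 (words.length : Int) 1).map (fun i =>
    String.mk (PySem.Chars.join [' '] ((PySem.List.slice words none (some i)).map String.toList)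
      ++ ['-'] ++ PySem.Chars.join [' '] ((PySem.List.slice words (some i) none).map String.toList)))

-- ===== PRECONDITION & SPEC =====
def Spec_generate_alternative_names_py (name : String) (out : List String) : Prop := out = generate_alternative_names_py_alt name
instance (name : String) (out : List String) : Decidable (Spec_generate_alternative_names_py name out) := by unfold Spec_generate_alternative_names_py; infer_instance

-- ===== CLAIM (what is proved, stated in full; the proofs are below) =====
def Claim_equal_generate_alternative_names_py : Prop := ∀ (name : String), Dom_generate_alternative_names_py name → Spec_generate_alternative_names_py name (generate_alternative_names_py name)

-- ===== LEMMAS AND PROOFS =====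

-- ' '-join of a word list, on char lists
def pvJ (ws : List String) : List Char := PySem.Chars.join [' '] (ws.map String.toList)

theorem pvJ_singleton (w : String) : pvJ [w] = w.toList := by
  simp [pvJ, PySem.Chars.join_singleton]

theorem pvJ_cons (w : String) (us : List String) (h : us ≠ []) :
    pvJ (w :: us) = w.toList ++ [' '] ++ pvJ us := by
  cases us with
  | nil => exact absurd rfl h
  | cons u t => simp [pvJ, PySem.Chars.join_cons_cons]

theorem pvFlat_eq (us : List String) (h : us ≠ []) :
    us.flatMap (fun w => w.toList ++ [' ']) = pvJ us ++ [' '] := by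
  induction us with
  | nil => exact absurd rfl h
  | cons w t ih =>
    cases t with
    | nil => simp [pvJ_singleton]
    | cons u s => simp only [List.flatMap_cons] at ih ⊢; rw [ih (by simp), pvJ_cons w (u :: s) (by simp)]; simp

theorem pvSlice_pred (s : List Char) :
    PySem.List.slice s none (some ((s.length : Int) - 1)) = s.dropLast := by
  cases s with
  | nil => simpa using PySem.List.slice_to_neg_one (xs := ([] : List Char))
  | cons c t =>
    have h1 : ((c :: t).length : Int) - 1 = ((t.length : Nat) : Int) := by push_cast [List.length_cons]; ring
    rw [h1, PySem.List.slice_to_natCast]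
    simp [List.dropLast_eq_take]

-- chunk of the inner loop not containing j = i and staying strictly before the last word
theorem pvChunk (ws : List String) (i : Int) :
    ∀ (k a : Nat) (s : List Char), a + k < ws.length →
    (∀ j : Int, (a : Int) ≤ j → j < (a : Int) + (k : Int) → i ≠ j) →
    (PySem.List.pyRange (a : Int) ((a : Int) + (k : Int)) 1).foldl (pvAInnerStep ws i) s
      = s ++ ((ws.drop a).take k).flatMap (fun w => w.toList ++ [' ']) := by
  intro k
  induction k with
  | zero => intro a s _ _; simp [PySem.List.pyRange_one_eq_nil]
  | succ k ih =>
    intro a s hlen hne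
    rw [PySem.List.pyRange_one_cons (by push_cast; omega), List.foldl_cons]
    have hstep : pvAInnerStep ws i s (a : Int) = s ++ ws[a]!.toList ++ [' '] := by
      have hia : (i == (a : Int)) = false := by
        simp only [beq_eq_false_iff_ne]; exact hne a le_rfl (by push_cast; omega)
      have hgd : PySem.List.pyGetD ws (a : Int) "" = ws[a]! := by
        rw [PySem.List.pyGetD_natCast]
        simp [List.getD_eq_getElem?_getD, List.getElem!_eq_getElem?_getD, List.getElem?_eq_getElem (by omega : a < ws.length)]
      simp only [pvAInnerStep, hia, Bool.false_eq_true, if_false, hgd]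
      rw [if_pos (by push_cast; omega)]
    rw [hstep]
    have hrec := ih (a + 1) (s ++ ws[a]!.toList ++ [' ']) (by omega)
      (fun j h1 h2 => hne j (by push_cast at h1 ⊢; omega) (by push_cast at h2 ⊢; omega))
    have hcast : ((a : Int) + 1) = ((a + 1 : Nat) : Int) := by push_cast; ring
    have hcast2 : ((a : Int) + ((k + 1 : Nat) : Int)) = ((a + 1 : Nat) : Int) + ((k : Nat) : Int) := by push_cast; ring
    rw [hcast2, hcast, hrec]
    have hdrop : ws.drop a = ws[a]! :: ws.drop (a + 1) := by
      rw [List.getElem!_eq_getElem?_getD, List.getElem?_eq_getElem (by omega : a < ws.length)]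
      simpa using (List.getElem_cons_drop (l := ws) (i := a) (h := by omega)).symm
    rw [hdrop]
    simp

-- tail of the inner loop: from word a (with i < a) to the end; produces the ' '-join of the suffix
theorem pvTail (ws : List String) (i : Int) :
    ∀ (k a : Nat) (s : List Char), a + k = ws.length → i < (a : Int) →
    (PySem.List.pyRange (a : Int) ((ws.length : Nat) : Int) 1).foldl (pvAInnerStep ws i) s
      = s ++ pvJ (ws.drop a) := by
  intro k
  induction k with
  | zero =>
    intro a s hlen _
    rw [PySem.List.pyRange_one_eq_nil (by omega)]
    have hd : ws.drop a = [] := List.drop_eq_nil_of_le (by omega)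
    simp [pvJ, hd, PySem.Chars.join_nil]
  | succ k ih =>
    intro a s hlen hia
    have ha : a < ws.length := by omega
    rw [PySem.List.pyRange_one_cons (by push_cast; omega), List.foldl_cons]
    have hiaf : (i == (a : Int)) = false := by
      simp only [beq_eq_false_iff_ne]; omega
    have hgd : PySem.List.pyGetD ws (a : Int) "" = ws[a]! := by
      rw [PySem.List.pyGetD_natCast]
      simp [List.getD_eq_getElem?_getD, List.getElem!_eq_getElem?_getD, List.getElem?_eq_getElem ha]
    have hdrop : ws.drop a = ws[a]! :: ws.drop (a + 1) := by
      rw [List.getElem!_eq_getElem?_getD, List.getElem?_eq_getElem ha]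
      simpa using (List.getElem_cons_drop (l := ws) (i := a) (h := ha)).symm
    cases Nat.eq_zero_or_pos k with
    | inl hk0 =>
      -- a is the last word: no trailing space, remaining range is empty
      subst hk0
      have hstep : pvAInnerStep ws i s (a : Int) = s ++ ws[a]!.toList := by
        simp only [pvAInnerStep, hiaf, Bool.false_eq_true, if_false, hgd]
        rw [if_neg (by push_cast; omega)]
      rw [hstep]
      have hcast : ((a : Int) + 1) = ((ws.length : Nat) : Int) := by push_cast; omega
      rw [hcast, PySem.List.pyRange_one_eq_nil le_rfl]
      have hdrop1 : ws.drop (a + 1) = [] := by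
        have : ws.length ≤ a + 1 := by omega
        simp [List.drop_eq_nil_of_le this]
      rw [hdrop, hdrop1] at *
      simp [pvJ_singleton, List.foldl_nil]
    | inr hkpos =>
      have hstep : pvAInnerStep ws i s (a : Int) = s ++ ws[a]!.toList ++ [' '] := by
        simp only [pvAInnerStep, hiaf, Bool.false_eq_true, if_false, hgd]
        rw [if_pos (by push_cast; omega)]
      rw [hstep]
      have hcast : ((a : Int) + 1) = ((a + 1 : Nat) : Int) := by push_cast; ring
      rw [hcast, ih (a + 1) _ (by omega) (by push_cast at hia ⊢; omega)]
      have hne : ws.drop (a + 1) ≠ [] := by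
        intro h; rw [List.drop_eq_nil_iff] at h; omega
      rw [hdrop, pvJ_cons _ _ hne]
      simp

-- the inner loop from the empty string, for 1 ≤ i < len
theorem pvInner (ws : List String) (i : Nat) (h1 : 1 ≤ i) (h2 : i < ws.length) :
    (PySem.List.pyRange 0 ((ws.length : Nat) : Int) 1).foldl (pvAInnerStep ws (i : Int)) []
      = pvJ (ws.take i) ++ '-' :: pvJ (ws.drop i) := by
  have hsplit : PySem.List.pyRange 0 ((ws.length : Nat) : Int) 1
      = PySem.List.pyRange 0 ((i : Nat) : Int) 1 ++ PySem.List.pyRange ((i : Nat) : Int) ((ws.length : Nat) : Int) 1 :=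
    PySem.List.pyRange_one_append _ _ _ (by push_cast; omega) (by push_cast; omega)
  rw [hsplit, List.foldl_append]
  have hchunk := pvChunk ws (i : Int) i 0 [] (by omega)
    (fun j hj1 hj2 => by push_cast at hj2; omega)
  simp only [Nat.cast_zero, zero_add, List.drop_zero, List.nil_append] at hchunk
  rw [hchunk]
  -- first prefix, ending in a space
  have htake_ne : ws.take i ≠ [] := by
    intro h
    rcases List.take_eq_nil_iff.mp h with h' | h'
    · omega
    · subst h'; simp at h2
  rw [pvFlat_eq _ htake_ne]
  -- the j = i step: the space is dropped, '-' and word i are appended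
  rw [PySem.List.pyRange_one_cons (by push_cast; omega), List.foldl_cons]
  have hgd : PySem.List.pyGetD ws (i : Int) "" = ws[i]! := by
    rw [PySem.List.pyGetD_natCast]
    simp [List.getD_eq_getElem?_getD, List.getElem!_eq_getElem?_getD, List.getElem?_eq_getElem h2]
  have hdropLast : (pvJ (ws.take i) ++ [' ']).dropLast = pvJ (ws.take i) := by
    simpa using List.dropLast_concat (l := pvJ (ws.take i)) (b := ' ')
  have hdrop : ws.drop i = ws[i]! :: ws.drop (i + 1) := by
    rw [List.getElem!_eq_getElem?_getD, List.getElem?_eq_getElem h2]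
    simpa using (List.getElem_cons_drop (l := ws) (i := i) (h := h2)).symm
  by_cases hlast : i + 1 = ws.length
  · -- word i is the last word: no trailing space, remaining range empty
    have hstep : pvAInnerStep ws (i : Int) (pvJ (ws.take i) ++ [' ']) (i : Int)
        = pvJ (ws.take i) ++ '-' :: ws[i]!.toList := by
      simp only [pvAInnerStep, beq_self_eq_true, if_true, pvSlice_pred, hdropLast, hgd]
      rw [if_neg (by push_cast; omega)]
      simp
    rw [hstep]
    have hcast : ((i : Nat) : Int) + 1 = ((ws.length : Nat) : Int) := by push_cast; omega
    rw [hcast, PySem.List.pyRange_one_eq_nil le_rfl, List.foldl_nil]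
    have hdrop1 : ws.drop (i + 1) = [] := List.drop_eq_nil_of_le (as := ws) (i := i + 1) (by omega)
    rw [hdrop, hdrop1, pvJ_singleton]
  · -- more words follow: trailing space, then the tail chunk
    have hstep : pvAInnerStep ws (i : Int) (pvJ (ws.take i) ++ [' ']) (i : Int)
        = pvJ (ws.take i) ++ '-' :: ws[i]!.toList ++ [' '] := by
      simp only [pvAInnerStep, beq_self_eq_true, if_true, pvSlice_pred, hdropLast, hgd]
      rw [if_pos (by push_cast; omega)]
      simp
    rw [hstep]
    have hcast : ((i : Nat) : Int) + 1 = ((i + 1 : Nat) : Int) := by push_cast; ring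
    rw [hcast, pvTail ws (i : Int) (ws.length - (i + 1)) (i + 1) _ (by omega) (by push_cast; omega)]
    have hne : ws.drop (i + 1) ≠ [] := by
      intro h; rw [List.drop_eq_nil_iff] at h; omega
    rw [hdrop, pvJ_cons _ _ hne]
    simp

-- the outer loop with its (names, current) pair state: current is always reset to []
theorem pvOuter (g : List Char → Int → List Char) :
    ∀ (l : List Int) (acc : List String),
    l.foldl (fun (st : List String × List Char) i => (st.1 ++ [String.mk (g st.2 i)], ([] : List Char))) (acc, [])
      = (acc ++ l.map (fun i => String.mk (g [] i)), ([] : List Char)) := by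
  intro l
  induction l with
  | nil => intro acc; simp
  | cons x t ih => intro acc; simp [ih]

theorem generate_alternative_names_py_spec : Claim_equal_generate_alternative_names_py := by
  unfold Claim_equal_generate_alternative_names_py
  intro name _
  unfold Spec_generate_alternative_names_py
  unfold generate_alternative_names_py generate_alternative_names_py_alt
  set ws := PySem.Str.split₀ name with hws
  simp only
  rw [pvOuter (fun s i => (PySem.List.pyRange 0 ((ws.length : Nat) : Int) 1).foldl (pvAInnerStep ws i) s)]
  simp only [List.nil_append]
  apply List.map_congr_left
  intro i hi
  rw [PySem.List.mem_pyRange_one] at hi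
  obtain ⟨hi1, hi2⟩ := hi
  have hiN : i = ((i.toNat : Nat) : Int) := by omega
  rw [hiN] at hi1 hi2 ⊢
  rw [PySem.List.slice_to_natCast, PySem.List.slice_from_natCast,
    pvInner ws i.toNat (by omega) (by push_cast at hi2; omega)]
  simp [pvJ]
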